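-- pv_equiv track=rewrite | github.com/iamxpy/qa-labeling | old_google_quest/scripts/bert_utils.py | _get_2sen_segments
-- ===== SOURCE A (Python) =====
-- def _get_2sen_segments(tokens, max_seq_length):
--     """Segments: 0 for the first sequence, 1 for the second"""
--     if len(tokens) > max_seq_length:
--         raise IndexError("Token length more than max seq length!")
--     segments = []
--     current_segment_id = 0
--     for token in tokens:
--         segments.append(current_segment_id)
--         if token == "[SEP]":
--             current_segment_id = 1
--     return segments + [0] * (max_seq_length - len(tokens))  # [PAD]对应segment id为0
-- ===== SOURCE B (Python) =====
-- def _get_2sen_segments(tokens, max_seq_length):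
--     """Segments: 0 for the first sequence, 1 for the second"""
--     n = len(tokens)
--     if n > max_seq_length:
--         raise IndexError("Token length more than max seq length!")
--     if "[SEP]" in tokens:
--         split = tokens.index("[SEP]")
--         segments = [0] * (split + 1) + [1] * (n - split - 1)
--     else:
--         segments = [0] * n
--     return segments + [0] * (max_seq_length - n)
-- ===== Notes on version B (the rewrite author's own statement) =====
-- stated objective: simpler
-- what changed: Replaced the stateful append-and-switch loop with locating the first '[SEP]' and building the 0-slab, 1-slab and padding directly by list repetition.
import Mathlib
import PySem

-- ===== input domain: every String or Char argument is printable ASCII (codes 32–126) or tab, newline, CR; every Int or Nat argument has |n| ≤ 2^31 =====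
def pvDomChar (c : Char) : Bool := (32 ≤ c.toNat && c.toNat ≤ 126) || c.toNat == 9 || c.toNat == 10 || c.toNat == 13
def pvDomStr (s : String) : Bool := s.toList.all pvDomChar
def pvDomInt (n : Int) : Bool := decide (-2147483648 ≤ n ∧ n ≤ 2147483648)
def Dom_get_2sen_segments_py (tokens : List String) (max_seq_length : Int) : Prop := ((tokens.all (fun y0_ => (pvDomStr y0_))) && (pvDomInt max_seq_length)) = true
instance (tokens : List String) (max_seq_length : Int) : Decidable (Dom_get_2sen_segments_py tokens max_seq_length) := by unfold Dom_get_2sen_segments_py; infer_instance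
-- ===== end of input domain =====

-- B replaces A's stateful append-and-switch loop by locating the first "[SEP]" and
-- concatenating replicated slabs; objective: simpler.

-- ===== PORT A =====
-- the for-loop over tokens, carrying (segments, current_segment_id)
def get_2sen_segments_py (tokens : List String) (max_seq_length : Int) : List Int :=
  let st := tokens.foldl
    (fun (st : List Int × Int) token =>
      (st.1 ++ [st.2], if token == "[SEP]" then 1 else st.2))
    ([], 0)
  st.1 ++ List.replicate (max_seq_length - (tokens.length : Int)).toNat 0

-- ===== PORT B =====
def get_2sen_segments_py_alt (tokens : List String) (max_seq_length : Int) : List Int :=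
  let n := tokens.length
  let segments :=
    match PySem.List.index? tokens "[SEP]" with   -- '"[SEP]" in tokens' + tokens.index("[SEP]")
    | some split => List.replicate (split + 1) (0 : Int) ++ List.replicate (n - split - 1) (1 : Int)
    | none => List.replicate n (0 : Int)
  segments ++ List.replicate (max_seq_length - (n : Int)).toNat 0

-- ===== PRECONDITION & SPEC =====
-- Pre_ excludes exactly the inputs where A raises IndexError (len(tokens) > max_seq_length).
def Pre_get_2sen_segments_py (tokens : List String) (max_seq_length : Int) : Prop :=
  (tokens.length : Int) ≤ max_seq_length
instance (tokens : List String) (max_seq_length : Int) : Decidable (Pre_get_2sen_segments_py tokens max_seq_length) := by unfold Pre_get_2sen_segments_py; infer_instance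
def pvWitness_get_2sen_segments_py : List String × Int := (["a", "[SEP]", "b"], 5)

def Spec_get_2sen_segments_py (tokens : List String) (max_seq_length : Int) (out : List Int) : Prop := out = get_2sen_segments_py_alt tokens max_seq_length
instance (tokens : List String) (max_seq_length : Int) (out : List Int) : Decidable (Spec_get_2sen_segments_py tokens max_seq_length out) := by unfold Spec_get_2sen_segments_py; infer_instance

-- ===== CLAIM (what is proved, stated in full; the proofs are below) =====
def Claim_equal_get_2sen_segments_py : Prop := ∀ (tokens : List String) (max_seq_length : Int), Dom_get_2sen_segments_py tokens max_seq_length → Pre_get_2sen_segments_py tokens max_seq_length → Spec_get_2sen_segments_py tokens max_seq_length (get_2sen_segments_py tokens max_seq_length)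

-- ===== LEMMAS AND PROOFS =====

-- A's loop body, as a function of the current segment id
def pvSeg (cur : Int) : List String → List Int
  | [] => []
  | t :: ts => cur :: pvSeg (if t == "[SEP]" then 1 else cur) ts

theorem foldl_eq_pvSeg (ts : List String) (acc : List Int) (cur : Int) :
    (ts.foldl (fun (st : List Int × Int) token =>
      (st.1 ++ [st.2], if token == "[SEP]" then 1 else st.2)) (acc, cur)).1
      = acc ++ pvSeg cur ts := by
  induction ts generalizing acc cur with
  | nil => simp [pvSeg]
  | cons t ts ih =>
    rw [List.foldl_cons, ih]
    simp [pvSeg]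

theorem pvSeg_one (ts : List String) : pvSeg 1 ts = List.replicate ts.length 1 := by
  induction ts with
  | nil => rfl
  | cons t ts ih =>
    simp only [pvSeg, List.length_cons, List.replicate_succ]
    split <;> simp [ih]

theorem pvSeg_zero (ts : List String) :
    pvSeg 0 ts =
      match PySem.List.index? ts "[SEP]" with
      | some split => List.replicate (split + 1) (0 : Int) ++ List.replicate (ts.length - split - 1) (1 : Int)
      | none => List.replicate ts.length (0 : Int) := by
  induction ts with
  | nil => rfl
  | cons t ts ih =>
    by_cases h : t = "[SEP]"
    · subst h
      rw [PySem.List.index?_cons_self]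
      simp [pvSeg, pvSeg_one, List.replicate_succ]
    · rw [PySem.List.index?_cons_of_ne ts h]
      simp only [pvSeg, beq_iff_eq, if_neg h, ih]
      cases hix : PySem.List.index? ts "[SEP]" with
      | none => simp [List.replicate_succ]
      | some k =>
        simp only [Option.map_some]
        simp only [List.length_cons]
        simp [List.replicate_succ]

-- ===== VERDICT (by name: the statement is the Claim_ definition above) =====
theorem get_2sen_segments_py_spec : Claim_equal_get_2sen_segments_py := by
  intro tokens max_seq_length _ _
  unfold Spec_get_2sen_segments_py get_2sen_segments_py get_2sen_segments_py_alt
  simp only [foldl_eq_pvSeg, List.nil_append, pvSeg_zero]
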